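-- pv_equiv track=rewrite | github.com/ajasja/INSRTR | insrtr/analysis.py | get_loops_from_annotation
-- ===== SOURCE A (Python) =====
-- def get_loops_from_annotation(annot: str, min_length=2, skip_ends=True, loop_char="L"):
--     """
--     Returns a list of list of loop indices (looks for `loop_char` in the string)
--
--     Parameters
--     ----------
--     annot : str
--         String containing annotation of secondary structure
--     min_length : int, optional
--        Minimum length to pick up as loop. At least `min_length` residues must be present.
--     skip_ends : bool, optional
--         Do not include "loops" at the end, by default True
--     loop_char : str, optional
--         What does the loop char look like, by default "L"
--
--     Returns
--     -------
--     list of list of list indices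
--     """
--
--     in_loop = False
--     loops = []
--
--     for n, c in enumerate(annot, start=1):
--         if c == loop_char:
--             if in_loop:
--                 single_loop.append(n)
--             else:  # starting new loop
--                 single_loop = []
--                 single_loop.append(n)
--                 in_loop = True
--         else:
--             if in_loop:  # end loop and push loop to loops
--                 loops.append(single_loop)
--             in_loop = False
--     else:  # end of loop don't forget to add last loop
--         if in_loop:
--             loops.append(single_loop)
--
--     # filter "loops" at the begging and end
--     if skip_ends:
--         # If string ends with loop char, it's just some ....LLLL at the end and not the loop
--         if annot[-1] == loop_char:
--             del loops[-1]
--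
--         # same for beggining
--         if annot[0] == loop_char:
--             del loops[0]
--
--     # filter on min size
--     if min_length > 0:
--         loops = [loop for loop in loops if len(loop) >= min_length]
--
--     return loops
-- ===== SOURCE B (Python) =====
-- def get_loops_from_annotation(annot: str, min_length=2, skip_ends=True, loop_char="L"):
--     """Two-pointer run scan: find each maximal run of loop_char and emit its
--     1-based index range directly, instead of a per-character state machine."""
--     loops = []
--     i, n = 0, len(annot)
--     while i < n:
--         if annot[i] == loop_char:
--             j = i + 1
--             while j < n and annot[j] == loop_char:
--                 j += 1
--             loops.append(list(range(i + 1, j + 1)))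
--             i = j
--         else:
--             i += 1
--
--     if skip_ends:
--         if annot[-1] == loop_char:
--             loops.pop()
--         if annot[0] == loop_char:
--             loops.pop(0)
--
--     if min_length > 0:
--         loops = [loop for loop in loops if len(loop) >= min_length]
--     return loops
-- ===== Notes on version B (the rewrite author's own statement) =====
-- stated objective: simpler
-- what changed: Replaced A's per-character state machine carrying an in_loop flag and a growing single_loop accumulator with a two-pointer scan that finds each maximal run of loop_char and emits its 1-based index range in one step; the skip_ends and min_length post-processing are kept.
import Mathlib
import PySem

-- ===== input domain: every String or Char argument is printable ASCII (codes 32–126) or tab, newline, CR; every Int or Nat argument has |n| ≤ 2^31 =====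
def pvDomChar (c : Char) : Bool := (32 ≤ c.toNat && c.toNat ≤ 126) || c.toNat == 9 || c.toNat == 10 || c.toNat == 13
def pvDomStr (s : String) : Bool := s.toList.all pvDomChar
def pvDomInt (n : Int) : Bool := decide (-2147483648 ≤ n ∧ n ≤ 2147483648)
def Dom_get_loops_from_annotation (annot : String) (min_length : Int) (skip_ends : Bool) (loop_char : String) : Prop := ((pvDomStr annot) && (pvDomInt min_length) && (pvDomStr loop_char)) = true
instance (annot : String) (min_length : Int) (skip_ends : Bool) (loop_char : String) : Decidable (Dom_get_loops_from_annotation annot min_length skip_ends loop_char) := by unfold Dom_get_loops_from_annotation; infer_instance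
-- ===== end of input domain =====

-- B replaces A's per-character in_loop state machine by a two-pointer scan that
-- emits each maximal run of loop_char as one index range (objective: simpler).

-- ===== PORT A =====
-- the for-loop with its (in_loop, single_loop, loops) state, enumerate start=1
def pvLoopA (loop_char : String) : List Char → Int → Bool → List Int → List (List Int) → List (List Int)
  | [], _, in_loop, single, loops => if in_loop then loops ++ [single] else loops
  | c :: rest, n, in_loop, single, loops =>
    if String.mk [c] == loop_char then
      if in_loop then pvLoopA loop_char rest (n + 1) true (single ++ [n]) loops
      else pvLoopA loop_char rest (n + 1) true [n] loops
    else
      if in_loop then pvLoopA loop_char rest (n + 1) false single (loops ++ [single])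
      else pvLoopA loop_char rest (n + 1) false single loops

def get_loops_from_annotation (annot : String) (min_length : Int) (skip_ends : Bool) (loop_char : String) : List (List Int) :=
  let loops := pvLoopA loop_char annot.toList 1 false [] []
  -- annot[-1] / annot[0]: Python raises on the empty string (excluded by Pre_);
  -- del loops[-1] / del loops[0] on an empty list raise too (excluded by Pre_).
  let loops := if skip_ends then
      let loops := if (PySem.Str.pyGet? annot (-1)).any (fun c => String.mk [c] == loop_char)
        then loops.dropLast else loops
      if (PySem.Str.pyGet? annot 0).any (fun c => String.mk [c] == loop_char)
        then loops.drop 1 else loops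
    else loops
  if min_length > 0 then loops.filter (fun loop => min_length ≤ (loop.length : Int)) else loops

-- ===== PORT B =====
-- two-pointer scan: on a match, take the whole maximal run at once
def pvScanB (loop_char : String) : List Char → Int → List (List Int)
  | [], _ => []
  | c :: rest, pos =>
    if String.mk [c] == loop_char then
      let k := (rest.takeWhile (fun d => String.mk [d] == loop_char)).length
      ((List.range (k + 1)).map (fun (t : Nat) => pos + (t : Int))) ::
        pvScanB loop_char (rest.dropWhile (fun d => String.mk [d] == loop_char)) (pos + (k : Int) + 1)
    else pvScanB loop_char rest (pos + 1)
  termination_by cs _ => cs.length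
  decreasing_by
    · exact Nat.lt_succ_of_le (List.length_dropWhile_le _ _)
    · exact Nat.lt_succ_of_le (Nat.le_refl _)

def get_loops_from_annotation_alt (annot : String) (min_length : Int) (skip_ends : Bool) (loop_char : String) : List (List Int) :=
  let loops := pvScanB loop_char annot.toList 1
  let loops := if skip_ends then
      let loops := if (PySem.Str.pyGet? annot (-1)).any (fun c => String.mk [c] == loop_char)
        then loops.dropLast else loops
      if (PySem.Str.pyGet? annot 0).any (fun c => String.mk [c] == loop_char)
        then loops.drop 1 else loops
    else loops
  if min_length > 0 then loops.filter (fun loop => min_length ≤ (loop.length : Int)) else loops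

-- ===== PRECONDITION & SPEC =====
-- Pre_ excludes exactly the inputs where Python A raises IndexError: with skip_ends,
-- an empty annot (annot[-1] fails) or an annot consisting entirely of loop_char
-- (both dels fire on a single run and the second hits an empty list).
def Pre_get_loops_from_annotation (annot : String) (min_length : Int) (skip_ends : Bool) (loop_char : String) : Prop :=
  ¬ (skip_ends = true ∧ annot.toList.all (fun c => String.mk [c] == loop_char) = true)
instance (annot : String) (min_length : Int) (skip_ends : Bool) (loop_char : String) : Decidable (Pre_get_loops_from_annotation annot min_length skip_ends loop_char) := by unfold Pre_get_loops_from_annotation; infer_instance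

def pvWitness_get_loops_from_annotation : String × Int × Bool × String := ("HLLH", 2, true, "L")

def Spec_get_loops_from_annotation (annot : String) (min_length : Int) (skip_ends : Bool) (loop_char : String) (out : List (List Int)) : Prop := out = get_loops_from_annotation_alt annot min_length skip_ends loop_char
instance (annot : String) (min_length : Int) (skip_ends : Bool) (loop_char : String) (out : List (List Int)) : Decidable (Spec_get_loops_from_annotation annot min_length skip_ends loop_char out) := by unfold Spec_get_loops_from_annotation; infer_instance

-- ===== CLAIM (what is proved, stated in full; the proofs are below) =====
def Claim_equal_get_loops_from_annotation : Prop := ∀ (annot : String) (min_length : Int) (skip_ends : Bool) (loop_char : String), Dom_get_loops_from_annotation annot min_length skip_ends loop_char → Pre_get_loops_from_annotation annot min_length skip_ends loop_char → Spec_get_loops_from_annotation annot min_length skip_ends loop_char (get_loops_from_annotation annot min_length skip_ends loop_char)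

-- ===== LEMMAS AND PROOFS =====

theorem pvMapRangeShift (n : Int) (k : Nat) :
    (List.range (k + 1)).map (fun (t : Nat) => n + (t : Int)) =
      n :: (List.range k).map (fun (t : Nat) => n + 1 + (t : Int)) := by
  rw [List.range_succ_eq_map, List.map_cons, List.map_map]
  simp only [Nat.cast_zero, add_zero]
  congr 1
  apply List.map_congr_left
  intro t _
  simp only [Function.comp_apply, Nat.succ_eq_add_one]
  push_cast
  ring

-- state-machine ↔ run-scan: both invariant shapes at once, by one induction on cs
theorem pvLoopA_eq_pvScanB (loop_char : String) (cs : List Char) :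
    ∀ (n : Int) (single : List Int) (loops : List (List Int)),
      pvLoopA loop_char cs n false single loops = loops ++ pvScanB loop_char cs n ∧
      pvLoopA loop_char cs n true single loops =
        loops ++ (single ++ (List.range ((cs.takeWhile (fun d => String.mk [d] == loop_char)).length)).map (fun (t : Nat) => n + (t : Int))) ::
          pvScanB loop_char (cs.dropWhile (fun d => String.mk [d] == loop_char)) (n + ((cs.takeWhile (fun d => String.mk [d] == loop_char)).length : Int)) := by
  induction cs with
  | nil => intro n single loops; simp [pvLoopA, pvScanB]
  | cons c rest ih =>
    intro n single loops
    by_cases h : (String.mk [c] == loop_char) = true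
    · constructor
      · rw [show pvLoopA loop_char (c :: rest) n false single loops
              = pvLoopA loop_char rest (n + 1) true [n] loops by simp [pvLoopA, h]]
        rw [(ih (n + 1) [n] loops).2]
        simp only [pvScanB, h, if_true]
        rw [pvMapRangeShift]
        have harith : n + ((rest.takeWhile (fun d => String.mk [d] == loop_char)).length : Int) + 1
            = n + 1 + ((rest.takeWhile (fun d => String.mk [d] == loop_char)).length : Int) := by ring
        rw [harith]
        simp
      · rw [show pvLoopA loop_char (c :: rest) n true single loops
              = pvLoopA loop_char rest (n + 1) true (single ++ [n]) loops by simp [pvLoopA, h]]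
        rw [(ih (n + 1) (single ++ [n]) loops).2]
        simp only [List.takeWhile_cons, List.dropWhile_cons, h, if_true, List.length_cons]
        rw [pvMapRangeShift]
        have harith : n + (((rest.takeWhile (fun d => String.mk [d] == loop_char)).length : Int) + 1)
            = n + 1 + ((rest.takeWhile (fun d => String.mk [d] == loop_char)).length : Int) := by ring
        push_cast
        rw [harith]
        simp [List.append_assoc]
    · constructor
      · rw [show pvLoopA loop_char (c :: rest) n false single loops
              = pvLoopA loop_char rest (n + 1) false single loops by simp [pvLoopA, h]]
        rw [(ih (n + 1) single loops).1]
        simp [pvScanB, h]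
      · rw [show pvLoopA loop_char (c :: rest) n true single loops
              = pvLoopA loop_char rest (n + 1) false single (loops ++ [single]) by simp [pvLoopA, h]]
        rw [(ih (n + 1) single (loops ++ [single])).1]
        simp only [List.takeWhile_cons, List.dropWhile_cons, h, if_false, Bool.false_eq_true]
        simp [pvScanB, h]

-- ===== VERDICT (by name: the statement is the Claim_ definition above) =====
theorem get_loops_from_annotation_spec : Claim_equal_get_loops_from_annotation := by
  intro annot min_length skip_ends loop_char _ _
  unfold Spec_get_loops_from_annotation
  unfold get_loops_from_annotation get_loops_from_annotation_alt
  rw [(pvLoopA_eq_pvScanB loop_char annot.toList 1 [] []).1]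
  rfl
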